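-- pv_equiv track=rewrite | github.com/bucky4300/Scripts | scripts/sum_odd_numbers_in_table.py | sum_odd_numbers_in_table
-- ===== SOURCE A (Python) =====
-- def sum_odd_numbers_in_table(n):
--     # Complete the function definition and place your implementation code here
--     total = 0 # Set sum to 0 to ensure accurate value
--     for i in range(1, n+1): # Create loop for number value + 1
--         for j in range(1, n+1):# Create second loop
--             sum = i * j # multiply values
--             if (sum % 2) != 0: # Find if they are odd or even
--                 total += sum # If odd add to total
--     result = total # set result = to total for display
--     return result
-- ===== SOURCE B (Python) =====
-- def sum_odd_numbers_in_table(n):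
--     # i*j is odd iff both i and j are odd, so the total is
--     # (sum of odd numbers <= n)^2 = k^4 with k = number of odd numbers <= n.
--     if n <= 0:
--         return 0
--     k = (n + 1) // 2
--     return k ** 4
-- ===== Notes on version B (the rewrite author's own statement) =====
-- stated objective: faster
-- what changed: Replaces the O(n^2) double loop summing odd products with the closed form ((n+1)//2)^4, since i*j is odd iff both factors are odd and the odd numbers up to n sum to ((n+1)//2)^2.
import Mathlib
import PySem

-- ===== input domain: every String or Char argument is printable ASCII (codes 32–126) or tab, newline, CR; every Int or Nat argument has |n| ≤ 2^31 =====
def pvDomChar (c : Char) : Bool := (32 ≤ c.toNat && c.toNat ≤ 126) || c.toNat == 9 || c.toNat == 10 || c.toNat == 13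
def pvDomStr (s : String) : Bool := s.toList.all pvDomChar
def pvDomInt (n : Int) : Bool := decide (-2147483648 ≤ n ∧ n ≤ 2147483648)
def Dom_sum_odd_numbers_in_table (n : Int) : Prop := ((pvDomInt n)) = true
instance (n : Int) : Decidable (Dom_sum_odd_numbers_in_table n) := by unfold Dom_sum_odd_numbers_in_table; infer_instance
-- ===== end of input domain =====

-- B replaces A's O(n^2) double loop by the closed form ((n+1)//2)^4 (i*j is odd iff both are odd).


-- ===== PORT A =====
-- literal transliteration: total = 0; for i in range(1, n+1): for j in range(1, n+1):
--   sum = i*j; if (sum % 2) != 0: total += sum; return total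
def sum_odd_numbers_in_table (n : Int) : Int :=
  (PySem.List.pyRange 1 (n + 1) 1).foldl
    (fun total i =>
      (PySem.List.pyRange 1 (n + 1) 1).foldl
        (fun total j =>
          let s := i * j
          if PySem.Int.mod s 2 ≠ 0 then total + s else total)
        total)
    0

-- ===== PORT B =====
def sum_odd_numbers_in_table_alt (n : Int) : Int :=
  if n ≤ 0 then 0
  else
    let k := PySem.Int.floordiv (n + 1) 2
    k ^ 4

-- ===== PRECONDITION & SPEC =====
def Spec_sum_odd_numbers_in_table (n : Int) (out : Int) : Prop := out = sum_odd_numbers_in_table_alt n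
instance (n : Int) (out : Int) : Decidable (Spec_sum_odd_numbers_in_table n out) := by unfold Spec_sum_odd_numbers_in_table; infer_instance

-- ===== CLAIM (what is proved, stated in full; the proofs are below) =====
def Claim_equal_sum_odd_numbers_in_table : Prop := ∀ (n : Int), Dom_sum_odd_numbers_in_table n → Spec_sum_odd_numbers_in_table n (sum_odd_numbers_in_table n)

-- ===== LEMMAS AND PROOFS =====

-- the contribution of one factor: x if odd else 0 (with A's Python-mod test)
def pvOddPart (x : Int) : Int := if PySem.Int.mod x 2 ≠ 0 then x else 0

theorem pvMod_two (x : Int) : PySem.Int.mod x 2 = x % 2 :=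
  PySem.Int.mod_eq_emod_of_pos (by norm_num)

theorem pvOddPart_mul (i j : Int) : pvOddPart (i * j) = pvOddPart i * pvOddPart j := by
  unfold pvOddPart
  rw [pvMod_two, pvMod_two, pvMod_two]
  have hij : (i * j) % 2 = (i % 2) * (j % 2) % 2 := Int.mul_emod i j 2
  rcases Int.emod_two_eq i with hi | hi <;> rcases Int.emod_two_eq j with hj | hj <;>
    rw [hi, hj] at hij <;> norm_num at hij <;> simp [hi, hj, hij]

theorem pvFoldl_add_sum (g : Int → Int) (l : List Int) (acc : Int) :
    l.foldl (fun t x => t + g x) acc = acc + (l.map g).sum := by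
  induction l generalizing acc with
  | nil => simp
  | cons x xs ih => simp [List.foldl_cons, ih]; ring

-- sum of odd numbers in 1..m equals ((m+1)/2)^2
theorem pvOdds_sum (m : Nat) :
    ((PySem.List.pyRange 1 ((m : Int) + 1) 1).map pvOddPart).sum
      = (((m + 1) / 2 : Nat) : Int) ^ 2 := by
  induction m with
  | zero => simp [PySem.List.pyRange_one_eq_nil]
  | succ m ih =>
    have hsplit : PySem.List.pyRange 1 ((↑(m + 1) : Int) + 1) 1
        = PySem.List.pyRange 1 ((m : Int) + 1) 1 ++ [(m : Int) + 1] := by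
      have := PySem.List.pyRange_one_succ_right (a := 1) (b := (m : Int) + 1) (by omega)
      push_cast
      simpa using this
    rw [hsplit, List.map_append, List.sum_append, ih]
    simp only [List.map_cons, List.map_nil, List.sum_cons, List.sum_nil, add_zero]
    rcases Nat.even_or_odd m with ⟨t, ht⟩ | ⟨t, ht⟩
    · -- m = 2t, m+1 odd
      subst ht
      have h1 : (t + t + 1) / 2 = t := by omega
      have h2 : (t + t + 1 + 1) / 2 = t + 1 := by omega
      have h3 : pvOddPart ((↑(t + t) : Int) + 1) = (↑(t + t) : Int) + 1 := by
        unfold pvOddPart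
        rw [pvMod_two, if_pos (by push_cast; omega)]
      rw [h1, h2, h3]
      push_cast
      ring
    · -- m = 2t+1, m+1 even
      subst ht
      have h1 : (2 * t + 1 + 1) / 2 = t + 1 := by omega
      have h2 : (2 * t + 1 + 1 + 1) / 2 = t + 1 := by omega
      have h3 : pvOddPart ((↑(2 * t + 1) : Int) + 1) = 0 := by
        unfold pvOddPart
        rw [pvMod_two, if_neg (by push_cast; omega)]
      rw [h1, h2, h3, add_zero]

-- inner loop body equals adding pvOddPart (i*j)
theorem pvInner_body (i : Int) :
    (fun (total j : Int) =>
        let s := i * j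
        if PySem.Int.mod s 2 ≠ 0 then total + s else total)
      = fun total j => total + pvOddPart (i * j) := by
  funext total j
  simp only [pvOddPart]
  split <;> simp

theorem pvA_closed (m : Nat) :
    sum_odd_numbers_in_table (m : Int) = ((((m + 1) / 2 : Nat) : Int) ^ 2) ^ 2 := by
  unfold sum_odd_numbers_in_table
  have hone : ∀ i acc : Int,
      (PySem.List.pyRange 1 ((m : Int) + 1) 1).foldl
        (fun total j =>
          let s := i * j
          if PySem.Int.mod s 2 ≠ 0 then total + s else total) acc
      = acc + pvOddPart i * (((m + 1) / 2 : Nat) : Int) ^ 2 := by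
    intro i acc
    rw [pvInner_body i, pvFoldl_add_sum (fun j => pvOddPart (i * j))]
    have : (PySem.List.pyRange 1 ((m : Int) + 1) 1).map (fun j => pvOddPart (i * j))
        = (PySem.List.pyRange 1 ((m : Int) + 1) 1).map (fun j => pvOddPart i * pvOddPart j) := by
      apply List.map_congr_left
      intro j _
      rw [pvOddPart_mul]
    rw [this, List.sum_map_mul_left, pvOdds_sum]
  calc (PySem.List.pyRange 1 ((m : Int) + 1) 1).foldl
        (fun total i => (PySem.List.pyRange 1 ((m : Int) + 1) 1).foldl
          (fun total j =>
            let s := i * j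
            if PySem.Int.mod s 2 ≠ 0 then total + s else total) total) 0
      = (PySem.List.pyRange 1 ((m : Int) + 1) 1).foldl
          (fun total i => total + pvOddPart i * (((m + 1) / 2 : Nat) : Int) ^ 2) 0 := by
        apply PySem.List.foldl_congr_mem
        intro acc i _
        exact hone i acc
    _ = ((PySem.List.pyRange 1 ((m : Int) + 1) 1).map
          (fun i => pvOddPart i * (((m + 1) / 2 : Nat) : Int) ^ 2)).sum := by
        rw [pvFoldl_add_sum]; simp
    _ = ((((m + 1) / 2 : Nat) : Int) ^ 2) ^ 2 := by
        rw [List.sum_map_mul_right, pvOdds_sum]; ring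

-- ===== VERDICT (by name: the statement is the Claim_ definition above) =====
theorem sum_odd_numbers_in_table_spec : Claim_equal_sum_odd_numbers_in_table := by
  intro n _
  unfold Spec_sum_odd_numbers_in_table sum_odd_numbers_in_table_alt
  by_cases hn : n ≤ 0
  · simp only [if_pos hn]
    unfold sum_odd_numbers_in_table
    rw [PySem.List.pyRange_one_eq_nil (by omega)]
    rfl
  · simp only [if_neg hn]
    have hm : n = ((n.toNat : Nat) : Int) := by omega
    rw [hm, pvA_closed]
    have hk : PySem.Int.floordiv (((n.toNat : Nat) : Int) + 1) 2
        = (((n.toNat + 1) / 2 : Nat) : Int) := by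
      have := PySem.Int.floordiv_natCast (n.toNat + 1) 2
      push_cast at this ⊢
      omega
    rw [hk]
    ring
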